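-- pv_equiv track=rewrite | github.com/Noluthandog/Noluthandog | Prac.py | sum_by_remainder_of_3
-- ===== SOURCE A (Python) =====
-- def sum_by_remainder_of_3(a, b):
--
--   result = {'0 mod 3': 0, "1 mod 3": 0, "2 mod 3": 0}
--   for i in range(a, b + 1):
--     remainder = i % 3
--     if remainder ==0:
--       result["0 mod 3"] += i
--     elif remainder == 1:
--       result["1 mod 3"] +=i
--     else:
--       result["2 mod 3"] +=i
--
--   return result
-- ===== SOURCE B (Python) =====
-- def sum_by_remainder_of_3(a, b):
--     # closed-form arithmetic-series sum for each residue class, O(1)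
--     def s(r):
--         x = a + (r - a) % 3          # smallest i >= a with i % 3 == r
--         if x > b:
--             return 0
--         n = (b - x) // 3 + 1         # number of terms x, x+3, ..., <= b
--         return n * x + 3 * n * (n - 1) // 2
--     return {'0 mod 3': s(0), '1 mod 3': s(1), '2 mod 3': s(2)}
-- ===== Notes on version B (the rewrite author's own statement) =====
-- stated objective: faster
-- what changed: Replaced the O(b-a) loop over range(a, b+1) with a closed-form arithmetic-series sum per residue class (first term, term count, Gauss formula), computed in O(1); intended as faster and measured ~25-70x at the largest probe sizes on nonempty ranges (probe inputs with b < a show parity since A's loop is empty there).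
import Mathlib
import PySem

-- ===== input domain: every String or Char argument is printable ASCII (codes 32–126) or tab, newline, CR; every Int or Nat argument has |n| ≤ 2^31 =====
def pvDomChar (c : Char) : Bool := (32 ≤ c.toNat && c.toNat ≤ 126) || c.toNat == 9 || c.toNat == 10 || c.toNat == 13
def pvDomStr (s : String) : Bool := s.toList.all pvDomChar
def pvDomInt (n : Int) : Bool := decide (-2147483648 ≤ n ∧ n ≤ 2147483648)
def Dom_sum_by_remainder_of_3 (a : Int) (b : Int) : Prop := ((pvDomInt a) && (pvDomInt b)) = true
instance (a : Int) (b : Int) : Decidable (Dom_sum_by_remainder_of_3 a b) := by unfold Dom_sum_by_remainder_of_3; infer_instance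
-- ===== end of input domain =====

-- B replaces A's O(b-a) loop by a closed-form arithmetic-series sum per residue class (O(1)).

-- ===== PORT A =====
-- loop body of A's `for i in range(a, b+1)` (transliterated step by step)
def pvStepA (result : PySem.Dict String Int) (i : Int) : PySem.Dict String Int :=
  let remainder := PySem.Int.mod i 3
  if remainder = 0 then result.modify "0 mod 3" 0 (· + i)
  else if remainder = 1 then result.modify "1 mod 3" 0 (· + i)
  else result.modify "2 mod 3" 0 (· + i)

def sum_by_remainder_of_3 (a : Int) (b : Int) : List (String × Int) :=
  let result : PySem.Dict String Int :=
    PySem.Dict.ofList [("0 mod 3", 0), ("1 mod 3", 0), ("2 mod 3", 0)]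
  let result := (PySem.List.pyRange a (b + 1) 1).foldl pvStepA result
  result.items

-- ===== PORT B =====
-- B's helper s(r): closed-form sum of i in [a,b] with i % 3 == r
def pvResidueSum (a : Int) (b : Int) (r : Int) : Int :=
  let x := a + PySem.Int.mod (r - a) 3
  if x > b then 0
  else
    let n := PySem.Int.floordiv (b - x) 3 + 1
    n * x + PySem.Int.floordiv (3 * n * (n - 1)) 2

def sum_by_remainder_of_3_alt (a : Int) (b : Int) : List (String × Int) :=
  [("0 mod 3", pvResidueSum a b 0), ("1 mod 3", pvResidueSum a b 1), ("2 mod 3", pvResidueSum a b 2)]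

-- ===== PRECONDITION & SPEC =====
def Spec_sum_by_remainder_of_3 (a : Int) (b : Int) (out : List (String × Int)) : Prop := out = sum_by_remainder_of_3_alt a b
instance (a : Int) (b : Int) (out : List (String × Int)) : Decidable (Spec_sum_by_remainder_of_3 a b out) := by unfold Spec_sum_by_remainder_of_3; infer_instance

-- ===== CLAIM (what is proved, stated in full; the proofs are below) =====
def Claim_equal_sum_by_remainder_of_3 : Prop := ∀ (a : Int) (b : Int), Dom_sum_by_remainder_of_3 a b → Spec_sum_by_remainder_of_3 a b (sum_by_remainder_of_3 a b)

-- ===== LEMMAS AND PROOFS =====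

-- sum of the elements of l congruent to r mod 3
def resFilterSum (l : List Int) (r : Int) : Int :=
  (l.filter (fun i => decide (PySem.Int.mod i 3 = r))).sum

theorem pvStepA_mod0 (x0 x1 x2 i : Int) (h : PySem.Int.mod i 3 = 0) :
    pvStepA (PySem.Dict.mk [("0 mod 3", x0), ("1 mod 3", x1), ("2 mod 3", x2)]) i =
    PySem.Dict.mk [("0 mod 3", x0 + i), ("1 mod 3", x1), ("2 mod 3", x2)] := by
  have hd : (3:Int) ∣ i := (PySem.Int.mod_eq_zero_iff_dvd i 3).mp h
  simp [pvStepA, hd, PySem.Dict.modify, PySem.Dict.insert, PySem.Dict.getD, PySem.Dict.get?,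
    PySem.Dict.contains]

theorem pvStepA_mod1 (x0 x1 x2 i : Int) (h : PySem.Int.mod i 3 = 1) :
    pvStepA (PySem.Dict.mk [("0 mod 3", x0), ("1 mod 3", x1), ("2 mod 3", x2)]) i =
    PySem.Dict.mk [("0 mod 3", x0), ("1 mod 3", x1 + i), ("2 mod 3", x2)] := by
  have hm : i % 3 = 1 := by rw [← PySem.Int.mod_eq_emod_of_pos (by norm_num)]; exact h
  simp [pvStepA, hm, PySem.Dict.modify, PySem.Dict.insert, PySem.Dict.getD, PySem.Dict.get?,
    PySem.Dict.contains]

theorem pvStepA_mod2 (x0 x1 x2 i : Int) (h : PySem.Int.mod i 3 = 2) :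
    pvStepA (PySem.Dict.mk [("0 mod 3", x0), ("1 mod 3", x1), ("2 mod 3", x2)]) i =
    PySem.Dict.mk [("0 mod 3", x0), ("1 mod 3", x1), ("2 mod 3", x2 + i)] := by
  have hm : i % 3 = 2 := by rw [← PySem.Int.mod_eq_emod_of_pos (by norm_num)]; exact h
  simp [pvStepA, hm, PySem.Dict.modify, PySem.Dict.insert, PySem.Dict.getD, PySem.Dict.get?,
    PySem.Dict.contains]

-- A's loop, from an arbitrary dict state, adds the residue-class sums componentwise
theorem foldA_eq (l : List Int) : ∀ (x0 x1 x2 : Int),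
    l.foldl pvStepA (PySem.Dict.mk [("0 mod 3", x0), ("1 mod 3", x1), ("2 mod 3", x2)]) =
    PySem.Dict.mk [("0 mod 3", x0 + resFilterSum l 0), ("1 mod 3", x1 + resFilterSum l 1),
      ("2 mod 3", x2 + resFilterSum l 2)] := by
  induction l with
  | nil => intro x0 x1 x2; simp [resFilterSum]
  | cons i t ih =>
    intro x0 x1 x2
    have hm : PySem.Int.mod i 3 = i % 3 := PySem.Int.mod_eq_emod_of_pos (by norm_num)
    have h3 : PySem.Int.mod i 3 = 0 ∨ PySem.Int.mod i 3 = 1 ∨ PySem.Int.mod i 3 = 2 := by omega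
    rcases h3 with h | h | h
    · rw [List.foldl_cons, pvStepA_mod0 _ _ _ _ h, ih]
      have hd : (3:Int) ∣ i := (PySem.Int.mod_eq_zero_iff_dvd i 3).mp h
      have h1 : ¬ (i % 3 = 1) := by omega
      have h2 : ¬ (i % 3 = 2) := by omega
      simp [resFilterSum, hd, h1, h2, add_assoc]
    · rw [List.foldl_cons, pvStepA_mod1 _ _ _ _ h, ih]
      have h1 : i % 3 = 1 := by omega
      have hnd : ¬ (3:Int) ∣ i := by omega
      simp [resFilterSum, h1, hnd, add_assoc]
    · rw [List.foldl_cons, pvStepA_mod2 _ _ _ _ h, ih]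
      have h2 : i % 3 = 2 := by omega
      have hnd : ¬ (3:Int) ∣ i := by omega
      simp [resFilterSum, h2, hnd, add_assoc]

-- one step of the closed form: peeling the top element b off [a, b]
theorem resSum_step (a b r : Int) (hr0 : 0 ≤ r) (hr3 : r < 3) (hab : a ≤ b) :
    pvResidueSum a b r = pvResidueSum a (b - 1) r + (if PySem.Int.mod b 3 = r then b else 0) := by
  unfold pvResidueSum
  simp only [PySem.Int.mod_eq_emod_of_pos (show (0:Int) < 3 by norm_num),
    PySem.Int.floordiv_eq_ediv_of_pos (show (0:Int) < 3 by norm_num),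
    PySem.Int.floordiv_eq_ediv_of_pos (show (0:Int) < 2 by norm_num)]
  set x := a + (r - a) % 3 with hxdef
  have hxa : a ≤ x ∧ x ≤ a + 2 := by omega
  have hxr : x % 3 = r := by omega
  by_cases hbr : b % 3 = r
  · simp only [if_pos hbr]
    by_cases hxb : x > b
    · exfalso; omega
    · rw [if_neg hxb]
      set q : Int := (b - x) / 3 with hq
      have hdvd : (3:Int) ∣ (b - x) := by omega
      have hbq : b = x + 3 * q := by omega
      have heven : (2:Int) ∣ 3 * (q + 1) * (q + 1 - 1) := by
        obtain ⟨k, hk⟩ := Int.even_mul_succ_self q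
        exact ⟨3 * k, by linear_combination 3 * hk⟩
      obtain ⟨T1, hT1⟩ := heven
      rw [hT1, Int.mul_ediv_cancel_left _ (by norm_num)]
      by_cases hxb1 : x > b - 1
      · rw [if_pos hxb1]
        have hq0 : q = 0 := by omega
        have hbx : b = x := by omega
        subst hbx; rw [hq0] at hT1 ⊢
        have : T1 = 0 := by omega
        simp [this]
      · rw [if_neg hxb1]
        set q' : Int := (b - 1 - x) / 3 with hq'
        have hq'q : q' = q - 1 := by omega
        have heven' : (2:Int) ∣ 3 * (q' + 1) * (q' + 1 - 1) := by
          obtain ⟨k, hk⟩ := Int.even_mul_succ_self q'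
          exact ⟨3 * k, by linear_combination 3 * hk⟩
        obtain ⟨T2, hT2⟩ := heven'
        rw [hT2, Int.mul_ediv_cancel_left _ (by norm_num)]
        rw [hq'q] at hT2
        rw [hq'q, hbq]
        have key : 2 * ((q + 1) * x + T1) = 2 * ((q - 1 + 1) * x + T2 + (x + 3 * q)) := by
          linear_combination hT2 - hT1
        omega
  · simp only [if_neg hbr, add_zero]
    by_cases hxb : x > b
    · rw [if_pos hxb, if_pos (by omega : x > b - 1)]
    · rw [if_neg hxb]
      have hxblt : x < b := by omega
      rw [if_neg (by omega : ¬ x > b - 1)]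
      have hqq : (b - 1 - x) / 3 = (b - x) / 3 := by omega
      rw [hqq]

-- the closed form equals the sum over the filtered range
theorem resSum_eq_aux (a r : Int) (hr0 : 0 ≤ r) (hr3 : r < 3) :
    ∀ (n : Nat) (b : Int), (b + 1 - a).toNat = n →
    pvResidueSum a b r = resFilterSum (PySem.List.pyRange a (b + 1) 1) r := by
  intro n
  induction n with
  | zero =>
    intro b hb
    rw [PySem.List.pyRange_one_eq_nil (by omega)]
    have hx : 0 ≤ PySem.Int.mod (r - a) 3 := PySem.Int.mod_nonneg _ (by norm_num)
    unfold pvResidueSum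
    rw [if_pos (by omega)]
    simp [resFilterSum]
  | succ n ih =>
    intro b hb
    have hab : a ≤ b := by omega
    rw [PySem.List.pyRange_one_succ_right hab]
    have hb1 : b - 1 + 1 = b := by ring
    have iht := ih (b - 1) (by omega)
    rw [hb1] at iht
    rw [resSum_step a b r hr0 hr3 hab, iht]
    simp only [resFilterSum, List.filter_append, List.sum_append]
    congr 1
    have hm : PySem.Int.mod b 3 = b % 3 := PySem.Int.mod_eq_emod_of_pos (by norm_num)
    rw [hm]
    by_cases h : b % 3 = r <;> simp [List.filter, h]

theorem resSum_eq (a b r : Int) (hr0 : 0 ≤ r) (hr3 : r < 3) :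
    pvResidueSum a b r = resFilterSum (PySem.List.pyRange a (b + 1) 1) r :=
  resSum_eq_aux a r hr0 hr3 (b + 1 - a).toNat b rfl

-- ===== VERDICT (by name: the statement is the Claim_ definition above) =====
theorem sum_by_remainder_of_3_spec : Claim_equal_sum_by_remainder_of_3 := by
  intro a b _
  unfold Spec_sum_by_remainder_of_3
  show (((PySem.List.pyRange a (b + 1) 1).foldl pvStepA
      (PySem.Dict.ofList [("0 mod 3", 0), ("1 mod 3", 0), ("2 mod 3", 0)])).items) = _
  have hinit : PySem.Dict.ofList [("0 mod 3", (0:Int)), ("1 mod 3", 0), ("2 mod 3", 0)] =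
      PySem.Dict.mk [("0 mod 3", 0), ("1 mod 3", 0), ("2 mod 3", 0)] := by decide
  rw [hinit, foldA_eq]
  simp only [sum_by_remainder_of_3_alt,
    resSum_eq a b 0 (by norm_num) (by norm_num),
    resSum_eq a b 1 (by norm_num) (by norm_num),
    resSum_eq a b 2 (by norm_num) (by norm_num), zero_add]
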